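-- pv_equiv track=rewrite | github.com/Tho33/adventOfCode | 2024/1/similarityScoreHelper.py | getListSimilarityScore
-- ===== SOURCE A (Python) =====
-- def howManyIdenticTargetInList(list: list, target: int) -> int:
--     count=0
--     for x in list:
--         if (x == target):
--             count+=1
--     return count
--
-- def getListSimilarityScore(listComputed: list, targetList: list) -> int:
--     listSimilarityScore=0
--     for x in listComputed:
--         lineSimilarityScore=0
--         sameValuesTotal=howManyIdenticTargetInList(targetList, x)
--         lineSimilarityScore=x * sameValuesTotal
--         listSimilarityScore+=lineSimilarityScore
--     return listSimilarityScore
-- ===== SOURCE B (Python) =====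
-- def getListSimilarityScore(listComputed: list, targetList: list) -> int:
--     cc = {}
--     for x in listComputed:
--         cc[x] = cc.get(x, 0) + 1
--     tc = {}
--     for x in targetList:
--         tc[x] = tc.get(x, 0) + 1
--     return sum(v * c * tc.get(v, 0) for v, c in cc.items())
-- ===== Notes on version B (the rewrite author's own statement) =====
-- stated objective: faster
-- what changed: Replaces the per-element rescan of targetList by two frequency dictionaries built in one pass each, summing v * count_left(v) * count_right(v) over the distinct values of listComputed.
import Mathlib
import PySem

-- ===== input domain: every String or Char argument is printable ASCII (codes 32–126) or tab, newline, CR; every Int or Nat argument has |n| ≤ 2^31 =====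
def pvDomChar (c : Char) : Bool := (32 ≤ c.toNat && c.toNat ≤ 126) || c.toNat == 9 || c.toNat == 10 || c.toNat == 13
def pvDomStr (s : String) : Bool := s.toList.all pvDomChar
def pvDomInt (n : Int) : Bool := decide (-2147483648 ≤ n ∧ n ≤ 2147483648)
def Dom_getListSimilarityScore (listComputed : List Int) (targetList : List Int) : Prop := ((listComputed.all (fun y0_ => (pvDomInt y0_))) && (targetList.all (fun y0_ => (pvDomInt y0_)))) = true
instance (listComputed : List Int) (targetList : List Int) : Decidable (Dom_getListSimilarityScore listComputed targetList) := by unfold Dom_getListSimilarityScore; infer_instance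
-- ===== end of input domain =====

-- B replaces A's per-element rescan of targetList (O(n*m)) by two frequency dictionaries built in
-- one pass each and a single sum over the distinct values of listComputed (objective: faster).

-- ===== PORT A =====
def howManyIdenticTargetInList (list : List Int) (target : Int) : Int :=
  list.foldl (fun count x => if x == target then count + 1 else count) 0

def getListSimilarityScore (listComputed : List Int) (targetList : List Int) : Int :=
  listComputed.foldl
    (fun listSimilarityScore x =>
      listSimilarityScore + x * howManyIdenticTargetInList targetList x) 0

-- ===== PORT B =====
def getListSimilarityScore_alt (listComputed : List Int) (targetList : List Int) : Int :=
  let cc := listComputed.foldl (fun d x => d.insert x (d.getD x 0 + 1)) PySem.Dict.empty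
  let tc := targetList.foldl (fun d x => d.insert x (d.getD x 0 + 1)) PySem.Dict.empty
  (cc.items.map (fun p => p.1 * p.2 * tc.getD p.1 0)).sum

-- ===== PRECONDITION & SPEC =====
def Spec_getListSimilarityScore (listComputed : List Int) (targetList : List Int) (out : Int) : Prop := out = getListSimilarityScore_alt listComputed targetList
instance (listComputed : List Int) (targetList : List Int) (out : Int) : Decidable (Spec_getListSimilarityScore listComputed targetList out) := by unfold Spec_getListSimilarityScore; infer_instance

-- ===== CLAIM (what is proved, stated in full; the proofs are below) =====
def Claim_equal_getListSimilarityScore : Prop := ∀ (listComputed : List Int) (targetList : List Int), Dom_getListSimilarityScore listComputed targetList → Spec_getListSimilarityScore listComputed targetList (getListSimilarityScore listComputed targetList)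

-- ===== LEMMAS AND PROOFS =====

-- Group-by-value: summing g over a list equals summing (multiplicity · g) over its distinct values.
lemma sum_group (g : Int → Int) (L : List Int) :
    ((PySem.Set.ofList L).map (fun v => (L.count v : Int) * g v)).sum = (L.map g).sum := by
  induction L with
  | nil => simp [PySem.Set.ofList_nil]
  | cons x xs ih =>
    rw [PySem.Set.ofList_cons]
    simp only [List.map_cons, List.sum_cons, List.count_cons_self]
    have hdis : ∀ v ∈ (PySem.Set.ofList xs).discard x,
        ((x :: xs).count v : Int) * g v = (xs.count v : Int) * g v := by
      intro v hv
      have hne : v ≠ x := ((PySem.Set.mem_discard _ _ _).mp hv).2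
      rw [List.count_cons_of_ne (Ne.symm hne)]
    rw [List.map_congr_left hdis]
    by_cases hx : x ∈ xs
    · have hmem : x ∈ PySem.Set.ofList xs := (PySem.Set.mem_ofList _ _).mpr hx
      have hnd : ((PySem.Set.ofList xs : List Int)).Nodup := PySem.Set.nodup_ofList xs
      have hnd2 : ((x :: (PySem.Set.ofList xs).discard x : List Int)).Nodup := by
        refine List.Nodup.cons ?_ (PySem.Set.nodup_discard _ _ hnd)
        simp [PySem.Set.mem_discard]
      have hperm : List.Perm (PySem.Set.ofList xs) (x :: (PySem.Set.ofList xs).discard x) := by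
        refine (List.perm_ext_iff_of_nodup hnd hnd2).mpr ?_
        intro a
        simp only [List.mem_cons, PySem.Set.mem_discard]
        constructor
        · intro ha; by_cases h : a = x
          · exact Or.inl h
          · exact Or.inr ⟨ha, h⟩
        · rintro (rfl | ⟨ha, _⟩)
          · exact hmem
          · exact ha
      have hs := (hperm.map (fun v => (xs.count v : Int) * g v)).sum_eq
      rw [hs] at ih
      simp only [List.map_cons, List.sum_cons] at ih
      push_cast
      linarith [ih]
    · have h0 : (xs.count x : Int) = 0 := by
        simp [List.count_eq_zero_of_not_mem hx]
      have hdx : (PySem.Set.ofList xs).discard x = PySem.Set.ofList xs := by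
        apply List.filter_eq_self.mpr
        intro a ha
        have hne : a ≠ x := fun h => hx (h ▸ (PySem.Set.mem_ofList _ _).mp ha)
        simp [hne]
      rw [hdx, ih]
      push_cast
      rw [h0]
      ring

lemma ports_agree (L T : List Int) : getListSimilarityScore L T = getListSimilarityScore_alt L T := by
  unfold getListSimilarityScore getListSimilarityScore_alt howManyIdenticTargetInList
  rw [PySem.Dict.foldl_insert_getD_add_one_eq_counter, PySem.Dict.foldl_insert_getD_add_one_eq_counter]
  simp only [PySem.Dict.items_counter, PySem.Dict.getD_counter, List.map_map]
  rw [PySem.List.foldl_add, zero_add]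
  have hA : (L.map fun x => x * T.foldl (fun count y => if y == x then count + 1 else count) 0)
      = L.map (fun v => v * (T.count v : Int)) := by
    apply List.map_congr_left
    intro v _
    rw [PySem.List.foldl_count_if]
    simp [List.count]
  rw [hA, ← sum_group (fun v => v * (T.count v : Int)) L]
  congr 1
  apply List.map_congr_left
  intro v _
  simp only [Function.comp_apply]
  ring

-- ===== VERDICT (by name: the statement is the Claim_ definition above) =====
theorem getListSimilarityScore_spec : Claim_equal_getListSimilarityScore := by
  intro L T _
  unfold Spec_getListSimilarityScore
  exact ports_agree L T
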